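-- pv_equiv track=rewrite | github.com/YoungLC/leetcode_python | sword/58-2.py | reverseLeftWords
-- ===== SOURCE A (Python) =====
-- def reverseLeftWords(s, n):
--     """
--     :type s: str
--     :type n: int
--     :rtype: str
--     """
--     len_s=len(s)
--     l,r=[],[]
--     for i in range(len_s):
--         if i<n:
--             l.append(s[i])
--         else:
--             r.append(s[i])
--     r.extend(l)
--     return "".join(r)
-- ===== SOURCE B (Python) =====
-- def reverseLeftWords(s, n):
--     """
--     :type s: str
--     :type n: int
--     :rtype: str
--     """
--     m = n if n >= 0 else 0
--     return s[m:] + s[:m]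
-- ===== Notes on version B (the rewrite author's own statement) =====
-- stated objective: simpler
-- what changed: Replaces the per-character index-classifying loop that builds two Python lists and joins them with two slices and a concatenation (rotation point clamped to 0, which also covers A's return-s-unchanged behaviour for negative n).
import Mathlib
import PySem

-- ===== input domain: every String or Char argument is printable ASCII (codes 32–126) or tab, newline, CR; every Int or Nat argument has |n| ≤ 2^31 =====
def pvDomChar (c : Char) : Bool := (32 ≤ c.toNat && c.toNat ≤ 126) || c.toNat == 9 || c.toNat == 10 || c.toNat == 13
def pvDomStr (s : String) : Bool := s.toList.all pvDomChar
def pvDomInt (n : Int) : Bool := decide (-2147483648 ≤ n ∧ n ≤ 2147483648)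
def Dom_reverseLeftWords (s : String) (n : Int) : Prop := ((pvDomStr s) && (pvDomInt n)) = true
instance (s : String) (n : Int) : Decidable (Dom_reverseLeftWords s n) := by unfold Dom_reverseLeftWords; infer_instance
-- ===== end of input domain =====

-- B replaces A's per-character classifying loop by two slices and a concatenation (simpler decomposition, same O(n) cost).

-- ===== PORT A =====
-- literal port: for i in range(len(s)): if i < n: l.append(s[i]) else: r.append(s[i]); r.extend(l); "".join(r)
-- s[i] is ported as pyGetD (exact here: every i drawn from range(len(s)) is in range)
def reverseLeftWords (s : String) (n : Int) : String :=
  let len_s : Int := (s.toList.length : Int)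
  let lr : List Char × List Char :=
    (PySem.List.pyRange 0 len_s 1).foldl
      (fun acc i =>
        if i < n then (acc.1 ++ [PySem.List.pyGetD s.toList i ' '], acc.2)
        else (acc.1, acc.2 ++ [PySem.List.pyGetD s.toList i ' ']))
      ([], [])
  String.ofList (lr.2 ++ lr.1)

-- ===== PORT B =====
-- literal port of Source B: m = n if n >= 0 else 0; return s[m:] + s[:m]
def reverseLeftWords_alt (s : String) (n : Int) : String :=
  let m : Int := if 0 ≤ n then n else 0
  String.ofList (PySem.List.slice s.toList (some m) none ++ PySem.List.slice s.toList none (some m))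

-- ===== PRECONDITION & SPEC =====
def Spec_reverseLeftWords (s : String) (n : Int) (out : String) : Prop := out = reverseLeftWords_alt s n
instance (s : String) (n : Int) (out : String) : Decidable (Spec_reverseLeftWords s n out) := by unfold Spec_reverseLeftWords; infer_instance

-- ===== CLAIM (what is proved, stated in full; the proofs are below) =====
def Claim_equal_reverseLeftWords : Prop := ∀ (s : String) (n : Int), Dom_reverseLeftWords s n → Spec_reverseLeftWords s n (reverseLeftWords s n)

-- ===== LEMMAS AND PROOFS =====

-- A's loop splits the index range at M = min (max n 0) len; the l/r lists are the two mapped segments.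
theorem reverseLeftWords_lists_eq (s : String) (n : Int) :
    reverseLeftWords s n = reverseLeftWords_alt s n := by
  unfold reverseLeftWords reverseLeftWords_alt
  dsimp only
  set cs := s.toList with hcs
  set len : Int := (cs.length : Int) with hlen
  set c : Int → Char := fun i => PySem.List.pyGetD cs i ' ' with hc
  set M : Int := min (max n 0) len with hM
  have h0M : (0 : Int) ≤ M := by positivity
  have hMlen : M ≤ len := min_le_right _ _
  -- split the loop range at M
  rw [PySem.List.pyRange_one_append 0 M len h0M hMlen, List.foldl_append]
  -- first segment: every i < n, so only l grows
  have hseg1 : (PySem.List.pyRange 0 M 1).foldl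
      (fun (acc : List Char × List Char) i =>
        if i < n then (acc.1 ++ [c i], acc.2) else (acc.1, acc.2 ++ [c i]))
      ([], []) = ((PySem.List.pyRange 0 M 1).map c, []) := by
    rw [PySem.List.foldl_congr_mem _ _
        (fun (acc : List Char × List Char) i => (acc.1 ++ [c i], acc.2)) _
        (by intro acc i hi
            have hb := (PySem.List.mem_pyRange_one).1 hi
            have hin : i < n := by omega
            simp [hin])]
    rw [PySem.List.foldl_prod_mk (fun (a : List Char) i => a ++ [c i]) (fun (b : List Char) _ => b)]
    rw [PySem.List.foldl_append_singleton_eq_map, PySem.List.foldl_ignore]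
    simp
  -- second segment: every i ≥ n, so only r grows
  have hseg2 : ∀ (L : List Char), (PySem.List.pyRange M len 1).foldl
      (fun (acc : List Char × List Char) i =>
        if i < n then (acc.1 ++ [c i], acc.2) else (acc.1, acc.2 ++ [c i]))
      (L, []) = (L, (PySem.List.pyRange M len 1).map c) := by
    intro L
    rw [PySem.List.foldl_congr_mem _ _
        (fun (acc : List Char × List Char) i => (acc.1, acc.2 ++ [c i])) _
        (by intro acc i hi
            have hb := (PySem.List.mem_pyRange_one).1 hi
            have hin : ¬ i < n := by omega
            simp [hin])]
    rw [PySem.List.foldl_prod_mk (fun (a : List Char) _ => a) (fun (b : List Char) i => b ++ [c i])]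
    rw [PySem.List.foldl_append_singleton_eq_map, PySem.List.foldl_ignore]
    simp
  rw [hseg1, hseg2]
  -- identify the mapped segments with drop/take
  have hdrop : (PySem.List.pyRange M len 1).map c = cs.drop M.toNat :=
    PySem.List.map_pyGetD_pyRange' cs ' ' h0M
  have hfull : (PySem.List.pyRange 0 len 1).map c = cs :=
    PySem.List.map_pyGetD_pyRange_zero' cs ' '
  have htake : (PySem.List.pyRange 0 M 1).map c = cs.take M.toNat := by
    have hsplit : (PySem.List.pyRange 0 M 1).map c ++ (PySem.List.pyRange M len 1).map c
        = cs.take M.toNat ++ cs.drop M.toNat := by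
      rw [← List.map_append, ← PySem.List.pyRange_one_append 0 M len h0M hMlen, hfull,
        List.take_append_drop]
    rw [hdrop] at hsplit
    exact List.append_cancel_right hsplit
  rw [hdrop, htake]
  -- B's slices: m = max n 0 (unclamped); drop/take clamp the same way
  have hm : (if 0 ≤ n then n else 0) = max n 0 := by omega
  rw [hm, PySem.List.slice_from cs (le_max_right n 0), PySem.List.slice_to cs (le_max_right n 0)]
  have hMt : M.toNat = min (max n 0).toNat cs.length := by
    simp [hM, hlen]; omega
  rw [hMt, ← List.drop_eq_drop_min, ← List.take_eq_take_min]

-- ===== VERDICT (by name: the statement is the Claim_ definition above) =====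
theorem reverseLeftWords_spec : Claim_equal_reverseLeftWords := by
  intro s n _
  unfold Spec_reverseLeftWords
  exact reverseLeftWords_lists_eq s n
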